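-- pv_equiv track=rewrite | github.com/ColasGael/advent_of_code | 2021/solver/day19.py | parse_beacons
-- ===== SOURCE A (Python) =====
-- def parse_beacons(input_lines):
--     sensors = []
--     for input_line in input_lines:
--         if len(input_line) == 0:
--             continue
--         if "scanner" in input_line:
--             sensors.append(set())
--         else:
--             coords = input_line.split(",")
--             beacon = (int(coords[0]), int(coords[1]), int(coords[2]))
--             sensors[-1].add(beacon)
--     return sensors
-- ===== SOURCE B (Python) =====
-- def parse_beacons(input_lines):
--     # pass 1: label each line with the number of scanner headers seen so far
--     labels = []
--     count = 0
--     for line in input_lines: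
--         if "scanner" in line:
--             count += 1
--         labels.append(count)
--     # pass 2: scatter the coordinate lines into preallocated per-scanner buckets
--     sensors = [set() for _ in range(count)]
--     for label, line in zip(labels, input_lines):
--         if line and "scanner" not in line:
--             coords = line.split(",")
--             sensors[label - 1].add((int(coords[0]), int(coords[1]), int(coords[2])))
--     return sensors
-- ===== Notes on version B (the rewrite author's own statement) =====
-- stated objective: alternative
-- what changed: A's single stateful loop that mutates the last set in place is replaced by a two-pass scatter algorithm: first label every line with a running count of scanner headers, then preallocate one bucket per scanner and scatter each coordinate line into the bucket selected by its label.
import Mathlib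
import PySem

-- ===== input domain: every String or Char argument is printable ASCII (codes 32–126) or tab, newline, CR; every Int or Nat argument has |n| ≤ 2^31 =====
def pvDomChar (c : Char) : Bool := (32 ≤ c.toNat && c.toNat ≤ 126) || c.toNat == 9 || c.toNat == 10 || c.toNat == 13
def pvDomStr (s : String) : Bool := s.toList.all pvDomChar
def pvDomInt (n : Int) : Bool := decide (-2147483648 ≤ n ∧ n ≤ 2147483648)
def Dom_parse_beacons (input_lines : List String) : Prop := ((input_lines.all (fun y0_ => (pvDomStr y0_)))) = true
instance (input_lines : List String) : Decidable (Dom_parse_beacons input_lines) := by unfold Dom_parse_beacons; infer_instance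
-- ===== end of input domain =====

-- B replaces A's single stateful loop (mutating the last set in place) by a two-pass scatter
-- algorithm: label every line with the number of scanner headers seen so far, preallocate one
-- bucket per scanner, then scatter each coordinate line into the bucket its label points at.


-- ===== PORT A =====
-- (int(coords[0]), int(coords[1]), int(coords[2])); under Pre_ the parses succeed, so the
-- defaults are never used (Python raises there, excluded by Pre_)
def pvParseA (line : String) : Int × Int × Int :=
  let coords := (PySem.Str.split? line ",").getD []
  ((PySem.Int.ofStr? (coords.getD 0 "")).getD 0,
   (PySem.Int.ofStr? (coords.getD 1 "")).getD 0,
   (PySem.Int.ofStr? (coords.getD 2 "")).getD 0)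

-- loop body of A: skip empty line / append new empty set / add parsed triple to the LAST set
def pvStepA (sensors : List (PySem.Set (Int × Int × Int))) (line : String) :
    List (PySem.Set (Int × Int × Int)) :=
  if PySem.Str.len line = 0 then sensors
  else if PySem.Str.isIn "scanner" line then sensors ++ [PySem.Set.empty]
  else match sensors.getLast? with
       | none => sensors  -- Python raises IndexError (sensors[-1] on []); excluded by Pre_
       | some s => sensors.dropLast ++ [PySem.Set.add s (pvParseA line)]

def parse_beacons (input_lines : List String) : List (List (Int × Int × Int)) :=
  input_lines.foldl pvStepA []

-- ===== PORT B =====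
-- the line parsing inside Source B's scatter pass (same parsing code as in A)
def pvParseB (line : String) : Int × Int × Int :=
  let coords := (PySem.Str.split? line ",").getD []
  ((PySem.Int.ofStr? (coords.getD 0 "")).getD 0,
   (PySem.Int.ofStr? (coords.getD 1 "")).getD 0,
   (PySem.Int.ofStr? (coords.getD 2 "")).getD 0)

-- pass-1 loop body: append the running header count as this line's label
def pvLabelStep (acc : List Int × Int) (line : String) : List Int × Int :=
  if PySem.Str.isIn "scanner" line then (acc.1 ++ [acc.2 + 1], acc.2 + 1)
  else (acc.1 ++ [acc.2], acc.2)

-- pass-2 loop body: sensors[label - 1].add(parsed beacon) for a non-empty non-header line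
def pvScatter (sensors : List (PySem.Set (Int × Int × Int))) (p : Int × String) :
    List (PySem.Set (Int × Int × Int)) :=
  if PySem.Str.len p.2 ≠ 0 ∧ PySem.Str.isIn "scanner" p.2 = false then
    match PySem.List.pyIdx? sensors.length (p.1 - 1) with
    | none => sensors  -- Python raises IndexError (sensors[-1] on []); excluded by Pre_
    | some j => sensors.set j (PySem.Set.add (sensors.getD j PySem.Set.empty) (pvParseB p.2))
  else sensors

def parse_beacons_alt (input_lines : List String) : List (List (Int × Int × Int)) :=
  let lc := input_lines.foldl pvLabelStep ([], 0)
  let sensors := (PySem.List.pyRange 0 lc.2).map (fun _ => PySem.Set.empty)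
  ((lc.1.zip input_lines).foldl pvScatter sensors : List (PySem.Set (Int × Int × Int)))

-- ===== PRECONDITION & SPEC =====
-- a coordinate line Python parses without raising: three comma-separated int()-parseable fields
def pvCoordOk (line : String) : Bool :=
  let coords := (PySem.Str.split? line ",").getD []
  (PySem.Int.ofStr? (coords.getD 0 "")).isSome &&
  (PySem.Int.ofStr? (coords.getD 1 "")).isSome &&
  (PySem.Int.ofStr? (coords.getD 2 "")).isSome

-- Pre_ excludes exactly the inputs where Python A raises: a line that is neither empty, nor a
-- scanner header, nor a parseable coordinate triple (ValueError/IndexError in int()/coords[2]),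
-- and a non-empty line before the first scanner header (IndexError on sensors[-1]).
def Pre_parse_beacons (input_lines : List String) : Prop :=
  (∀ line ∈ input_lines,
     PySem.Str.len line = 0 ∨ PySem.Str.isIn "scanner" line = true ∨ pvCoordOk line = true) ∧
  (∀ line ∈ input_lines.takeWhile (fun l => !PySem.Str.isIn "scanner" l),
     PySem.Str.len line = 0)
instance (input_lines : List String) : Decidable (Pre_parse_beacons input_lines) := by
  unfold Pre_parse_beacons; infer_instance

def pvWitness_parse_beacons : List String :=
  ["--- scanner 0 ---", "1,2,3", "", "4,-5,6", "--- scanner 1 ---", "7,8,9"]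

def Spec_parse_beacons (input_lines : List String) (out : List (List (Int × Int × Int))) : Prop := out = parse_beacons_alt input_lines
instance (input_lines : List String) (out : List (List (Int × Int × Int))) : Decidable (Spec_parse_beacons input_lines out) := by unfold Spec_parse_beacons; infer_instance

-- ===== CLAIM (what is proved, stated in full; the proofs are below) =====
def Claim_equal_parse_beacons : Prop := ∀ (input_lines : List String), Dom_parse_beacons input_lines → Pre_parse_beacons input_lines → Spec_parse_beacons input_lines (parse_beacons input_lines)

-- ===== LEMMAS AND PROOFS =====

-- the common splitting structure both proofs are reduced to: the (unfiltered) runs of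
-- non-header lines following each header line
def pvG : List String → List (List String)
  | [] => []
  | l :: rest =>
    if PySem.Str.isIn "scanner" l then
      rest.takeWhile (fun x => !PySem.Str.isIn "scanner" x)
        :: pvG (rest.dropWhile (fun x => !PySem.Str.isIn "scanner" x))
    else pvG rest
  termination_by lines => lines.length
  decreasing_by
    · exact Nat.lt_succ_of_le (List.length_dropWhile_le _ _)
    · exact Nat.lt_succ_self _

lemma pvG_nil : pvG [] = [] := by rw [pvG]

lemma pvG_cons_pos {l : String} (rest : List String)
    (h : PySem.Str.isIn "scanner" l = true) :
    pvG (l :: rest)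
      = rest.takeWhile (fun x => !PySem.Str.isIn "scanner" x)
          :: pvG (rest.dropWhile (fun x => !PySem.Str.isIn "scanner" x)) := by
  rw [pvG, if_pos h]

lemma pvG_cons_neg {l : String} (rest : List String)
    (h : PySem.Str.isIn "scanner" l = false) :
    pvG (l :: rest) = pvG rest := by
  rw [pvG, if_neg (by rw [h]; simp)]

-- A's treatment of one non-header line of a run
def pvAddLine (s : PySem.Set (Int × Int × Int)) (l : String) : PySem.Set (Int × Int × Int) :=
  if PySem.Str.len l = 0 then s else PySem.Set.add s (pvParseA l)

def pvRun (g : List String) : List (Int × Int × Int) :=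
  g.foldl pvAddLine PySem.Set.empty

lemma pvScannerNonempty {line : String} (h : PySem.Str.isIn "scanner" line = true) :
    ¬ PySem.Str.len line = 0 := by
  rw [PySem.Str.isIn_iff_infix] at h
  have h1 : "scanner".toList.length ≤ line.toList.length := h.length_le
  have h2 : "scanner".toList.length = 7 := rfl
  simp only [PySem.Str.len_eq]
  omega

-- uniform per-run result: parse the non-empty lines of a run into a set
def pvRes (g : List String) : List (Int × Int × Int) :=
  PySem.Set.ofList ((g.filter (fun l => !(PySem.Str.len l == 0))).map pvParseB)

-- A's fold over one run equals the filtered-parse set of the run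
lemma pvRun_eq (g : List String) : pvRun g = pvRes g := by
  unfold pvRun pvRes
  rw [PySem.Set.ofList_eq_foldl, List.foldl_map, ← PySem.List.foldl_if_eq_foldl_filter]
  have hempty : (PySem.Set.empty : PySem.Set (Int × Int × Int)) = [] := rfl
  rw [hempty]
  refine PySem.List.foldl_congr_mem _ _ _ _ (fun acc x _ => ?_)
  by_cases hl : PySem.Str.len x = 0
  · have hb : (PySem.Str.len x == 0) = true := by simp only [beq_iff_eq]; exact hl
    rw [pvAddLine, if_pos hl, hb]
    simp
  · have hb : (PySem.Str.len x == 0) = false := by simp only [beq_eq_false_iff_ne]; exact hl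
    rw [pvAddLine, if_neg hl, hb]
    simp only [Bool.not_false, if_pos rfl]
    rfl

-- A's loop with a non-empty accumulator: the current run extends the last set, the
-- remaining runs become fresh sets
lemma pvWA (lines : List String) :
    ∀ (gs : List (PySem.Set (Int × Int × Int))) (s : PySem.Set (Int × Int × Int)),
    lines.foldl pvStepA (gs ++ [s])
      = gs ++ ((lines.takeWhile (fun x => !PySem.Str.isIn "scanner" x)).foldl pvAddLine s)
          :: (pvG (lines.dropWhile (fun x => !PySem.Str.isIn "scanner" x))).map pvRun := by
  induction lines with
  | nil => intro gs s; simp [pvG_nil]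
  | cons l rest ih =>
    intro gs s
    by_cases h : PySem.Str.isIn "scanner" l = true
    · have hne := pvScannerNonempty h
      have hstep : pvStepA (gs ++ [s]) l = (gs ++ [s]) ++ [PySem.Set.empty] := by
        simp only [pvStepA]; rw [if_neg hne, if_pos h]
      simp only [List.foldl_cons, hstep]
      rw [ih (gs ++ [s]) PySem.Set.empty]
      rw [List.takeWhile_cons, List.dropWhile_cons, h]
      simp only [Bool.not_true, Bool.false_eq_true, if_false]
      rw [pvG_cons_pos rest h]
      simp [pvRun, List.append_assoc]
    · have hf : PySem.Str.isIn "scanner" l = false := by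
        revert h; cases PySem.Str.isIn "scanner" l <;> simp
      have hstep : pvStepA (gs ++ [s]) l = gs ++ [pvAddLine s l] := by
        simp only [pvStepA, pvAddLine]
        by_cases hl : PySem.Str.len l = 0
        · rw [if_pos hl, if_pos hl]
        · rw [if_neg hl, if_neg (by rw [hf]; simp), if_neg hl]
          rw [List.getLast?_concat, List.dropLast_concat]
      simp only [List.foldl_cons, hstep]
      rw [ih gs (pvAddLine s l)]
      rw [List.takeWhile_cons, List.dropWhile_cons, hf]
      simp

-- A's result is the parsed runs, provided every line before the first header is empty
lemma pvA_eq (lines : List String)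
    (hPre2 : ∀ line ∈ lines.takeWhile (fun l => !PySem.Str.isIn "scanner" l),
       PySem.Str.len line = 0) :
    parse_beacons lines = (pvG lines).map pvRes := by
  induction lines with
  | nil => simp [parse_beacons, pvG_nil]
  | cons l rest ih =>
    by_cases h : PySem.Str.isIn "scanner" l = true
    · have hne := pvScannerNonempty h
      have hstep : pvStepA [] l = [] ++ [PySem.Set.empty] := by
        simp only [pvStepA]; rw [if_neg hne, if_pos h]
      show (l :: rest).foldl pvStepA [] = _
      simp only [List.foldl_cons, hstep]
      rw [pvWA rest [] PySem.Set.empty, pvG_cons_pos rest h]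
      simp only [List.nil_append, List.map_cons]
      refine congrArg₂ _ ?_ (List.map_congr_left (fun g _ => pvRun_eq g))
      exact pvRun_eq _
    · have hf : PySem.Str.isIn "scanner" l = false := by
        revert h; cases PySem.Str.isIn "scanner" l <;> simp
      have hl : PySem.Str.len l = 0 := by
        refine hPre2 l ?_
        rw [List.takeWhile_cons, hf]
        simp
      have hstep : pvStepA [] l = [] := by
        simp only [pvStepA]; rw [if_pos hl]
      show (l :: rest).foldl pvStepA [] = _
      simp only [List.foldl_cons, hstep]
      have hrest : ∀ line ∈ rest.takeWhile (fun l => !PySem.Str.isIn "scanner" l),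
          PySem.Str.len line = 0 := by
        intro line hm
        refine hPre2 line ?_
        rw [List.takeWhile_cons, hf]
        simp only [Bool.not_false, if_pos rfl]
        exact List.mem_cons_of_mem _ hm
      rw [pvG_cons_neg rest hf]
      exact ih hrest

-- header count and the per-line labels of Source B's first pass, structurally
def pvHC : List String → Nat
  | [] => 0
  | l :: rest => (if PySem.Str.isIn "scanner" l then 1 else 0) + pvHC rest

def pvLab (c : Int) : List String → List Int
  | [] => []
  | l :: rest =>
    if PySem.Str.isIn "scanner" l then (c + 1) :: pvLab (c + 1) rest
    else c :: pvLab c rest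

lemma pvHC_cons_pos {l : String} (rest : List String)
    (h : PySem.Str.isIn "scanner" l = true) : pvHC (l :: rest) = pvHC rest + 1 := by
  rw [pvHC, if_pos h, Nat.add_comm]

lemma pvHC_cons_neg {l : String} (rest : List String)
    (h : PySem.Str.isIn "scanner" l = false) : pvHC (l :: rest) = pvHC rest := by
  rw [pvHC, if_neg (by rw [h]; simp), Nat.zero_add]

lemma pvLab_cons_pos {l : String} (c : Int) (rest : List String)
    (h : PySem.Str.isIn "scanner" l = true) :
    pvLab c (l :: rest) = (c + 1) :: pvLab (c + 1) rest := by
  rw [pvLab, if_pos h]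

lemma pvLab_cons_neg {l : String} (c : Int) (rest : List String)
    (h : PySem.Str.isIn "scanner" l = false) :
    pvLab c (l :: rest) = c :: pvLab c rest := by
  rw [pvLab, if_neg (by rw [h]; simp)]

-- Source B's first pass computes exactly the labels and the header count
lemma pvLabFold (lines : List String) : ∀ (acc : List Int) (c : Int),
    lines.foldl pvLabelStep (acc, c) = (acc ++ pvLab c lines, c + (pvHC lines : Int)) := by
  induction lines with
  | nil => intro acc c; rw [pvLab, pvHC]; simp
  | cons l rest ih =>
    intro acc c
    by_cases h : PySem.Str.isIn "scanner" l = true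
    · have hstep : pvLabelStep (acc, c) l = (acc ++ [c + 1], c + 1) := by
        rw [pvLabelStep, if_pos h]
      rw [List.foldl_cons, hstep, ih (acc ++ [c + 1]) (c + 1),
          pvLab_cons_pos c rest h, pvHC_cons_pos rest h]
      refine congrArg₂ _ (by simp) ?_
      push_cast; ring
    · have hf : PySem.Str.isIn "scanner" l = false := by
        revert h; cases PySem.Str.isIn "scanner" l <;> simp
      have hstep : pvLabelStep (acc, c) l = (acc ++ [c], c) := by
        rw [pvLabelStep, if_neg (by rw [hf]; simp)]
      rw [List.foldl_cons, hstep, ih (acc ++ [c]) c,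
          pvLab_cons_neg c rest hf, pvHC_cons_neg rest hf]
      simp

-- one scatter step on a header line or an empty line leaves the buckets unchanged
lemma pvScatter_skip (st : List (PySem.Set (Int × Int × Int))) (c : Int) (l : String)
    (h : PySem.Str.isIn "scanner" l = true ∨ PySem.Str.len l = 0) :
    pvScatter st (c, l) = st := by
  rcases h with h | h
  · rw [pvScatter, if_neg (fun hc => by rw [h] at hc; exact absurd hc.2 (by simp))]
  · rw [pvScatter, if_neg (fun hc => hc.1 h)]

-- one scatter step on a run line of the bucket after 'done' updates exactly that bucket
lemma pvScatter_mid (done : List (PySem.Set (Int × Int × Int)))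
    (cur : PySem.Set (Int × Int × Int)) (todo : List (PySem.Set (Int × Int × Int)))
    (l : String) (hf : PySem.Str.isIn "scanner" l = false) :
    pvScatter (done ++ cur :: todo) ((done.length : Int) + 1, l)
      = done ++ pvAddLine cur l :: todo := by
  by_cases hl : PySem.Str.len l = 0
  · rw [pvScatter_skip _ _ _ (Or.inr hl), pvAddLine, if_pos hl]
  · rw [pvScatter, if_pos ⟨hl, hf⟩, pvAddLine, if_neg hl]
    rw [show ((done.length : Int) + 1 - 1) = ((done.length : Nat) : Int) by push_cast; ring]
    have hlt : done.length < (done ++ cur :: todo).length := by simp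
    rw [show PySem.List.pyIdx? (done ++ cur :: todo).length ((done.length : Nat) : Int)
          = some done.length by simp [PySem.List.pyIdx?, hlt]]
    show (done ++ cur :: todo).set done.length
        (PySem.Set.add ((done ++ cur :: todo).getD done.length PySem.Set.empty)
          (pvParseB (((done.length : Int) + 1, l) : Int × String).2))
      = done ++ PySem.Set.add cur (pvParseA l) :: todo
    rw [List.getD_append_right done (cur :: todo) _ done.length (le_refl _),
        List.set_append_right _ _ (le_refl _)]
    simp
    rfl

-- the scatter pass, started after k headers with buckets (done, cur, one fresh bucket per
-- remaining header): the current run fills 'cur', the remaining runs fill the fresh buckets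
lemma pvSC (lines : List String) :
    ∀ (done : List (PySem.Set (Int × Int × Int))) (cur : PySem.Set (Int × Int × Int)),
    ((pvLab ((done.length : Int) + 1) lines).zip lines).foldl pvScatter
        (done ++ cur :: List.replicate (pvHC lines) PySem.Set.empty)
      = done ++ ((lines.takeWhile (fun x => !PySem.Str.isIn "scanner" x)).foldl pvAddLine cur)
          :: (pvG (lines.dropWhile (fun x => !PySem.Str.isIn "scanner" x))).map pvRun := by
  induction lines with
  | nil => intro done cur; rw [pvLab, pvHC]; simp [pvG_nil]
  | cons l rest ih =>
    intro done cur
    by_cases h : PySem.Str.isIn "scanner" l = true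
    · rw [pvLab_cons_pos _ rest h, pvHC_cons_pos rest h, List.zip_cons_cons,
          List.foldl_cons, List.replicate_succ,
          show (done ++ cur :: PySem.Set.empty
                  :: List.replicate (pvHC rest) PySem.Set.empty)
            = (done ++ [cur]) ++ PySem.Set.empty
                :: List.replicate (pvHC rest) PySem.Set.empty by simp,
          pvScatter_skip _ _ _ (Or.inl h),
          show ((done.length : Int) + 1 + 1) = (((done ++ [cur]).length : Nat) : Int) + 1 by
            simp,
          ih (done ++ [cur]) PySem.Set.empty]
      rw [List.takeWhile_cons, List.dropWhile_cons, h]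
      simp only [Bool.not_true, Bool.false_eq_true, if_false]
      rw [pvG_cons_pos rest h]
      simp [pvRun, List.append_assoc]
    · have hf : PySem.Str.isIn "scanner" l = false := by
        revert h; cases PySem.Str.isIn "scanner" l <;> simp
      rw [pvLab_cons_neg _ rest hf, pvHC_cons_neg rest hf, List.zip_cons_cons,
          List.foldl_cons, pvScatter_mid done cur _ l hf, ih done (pvAddLine cur l)]
      rw [List.takeWhile_cons, List.dropWhile_cons, hf]
      simp

-- the scatter pass from the start: every line before the first header is empty, so nothing
-- is written until the first header opens bucket 0
lemma pvB_main (lines : List String) :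
    (∀ line ∈ lines.takeWhile (fun l => !PySem.Str.isIn "scanner" l),
       PySem.Str.len line = 0) →
    ((pvLab 0 lines).zip lines).foldl pvScatter
        (List.replicate (pvHC lines) PySem.Set.empty)
      = (pvG lines).map pvRun := by
  induction lines with
  | nil => intro _; rw [pvLab, pvHC, pvG_nil]; rfl
  | cons l rest ih =>
    intro hPre2
    by_cases h : PySem.Str.isIn "scanner" l = true
    · rw [pvLab_cons_pos _ rest h, pvHC_cons_pos rest h, List.zip_cons_cons,
          List.foldl_cons, List.replicate_succ, pvScatter_skip _ _ _ (Or.inl h),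
          show (PySem.Set.empty :: List.replicate (pvHC rest) PySem.Set.empty
                  : List (PySem.Set (Int × Int × Int)))
            = [] ++ PySem.Set.empty :: List.replicate (pvHC rest) PySem.Set.empty from rfl,
          show ((0 : Int) + 1)
            = ((([] : List (PySem.Set (Int × Int × Int))).length : Nat) : Int) + 1 by simp,
          pvSC rest [] PySem.Set.empty, pvG_cons_pos rest h]
      simp [pvRun]
    · have hf : PySem.Str.isIn "scanner" l = false := by
        revert h; cases PySem.Str.isIn "scanner" l <;> simp
      have hl : PySem.Str.len l = 0 := by
        refine hPre2 l ?_
        rw [List.takeWhile_cons, hf]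
        simp
      have hrest : ∀ line ∈ rest.takeWhile (fun l => !PySem.Str.isIn "scanner" l),
          PySem.Str.len line = 0 := by
        intro line hm
        refine hPre2 line ?_
        rw [List.takeWhile_cons, hf]
        simp only [Bool.not_false, if_pos rfl]
        exact List.mem_cons_of_mem _ hm
      rw [pvLab_cons_neg _ rest hf, pvHC_cons_neg rest hf, List.zip_cons_cons,
          List.foldl_cons, pvScatter_skip _ _ _ (Or.inr hl), pvG_cons_neg rest hf]
      exact ih hrest

-- unfold B's port: pass 1 gives the labels and the bucket count, the scatter pass fills the runs
lemma pvB_eq (lines : List String)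
    (hPre2 : ∀ line ∈ lines.takeWhile (fun l => !PySem.Str.isIn "scanner" l),
       PySem.Str.len line = 0) :
    parse_beacons_alt lines = (pvG lines).map pvRes := by
  show ((lines.foldl pvLabelStep ([], 0)).1.zip lines).foldl pvScatter
        ((PySem.List.pyRange 0 (lines.foldl pvLabelStep ([], 0)).2).map
          (fun _ => PySem.Set.empty))
      = (pvG lines).map pvRes
  rw [pvLabFold lines [] 0]
  simp only [List.nil_append, zero_add]
  rw [show (PySem.List.pyRange 0 ((pvHC lines : Nat) : Int)).map
        (fun _ : Int => (PySem.Set.empty : PySem.Set (Int × Int × Int)))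
      = List.replicate (pvHC lines) PySem.Set.empty by
        rw [List.map_const', PySem.List.pyRange_zero_natCast, List.length_map,
          List.length_range]]
  rw [pvB_main lines hPre2]
  exact List.map_congr_left (fun g _ => pvRun_eq g)

-- ===== VERDICT (by name: the statement is the Claim_ definition above) =====
theorem parse_beacons_spec : Claim_equal_parse_beacons := by
  intro input_lines _ hPre
  show parse_beacons input_lines = parse_beacons_alt input_lines
  rw [pvA_eq input_lines hPre.2, pvB_eq input_lines hPre.2]
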